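-- pv_equiv track=rewrite | github.com/pypi-data/pypi-mirror-10 | packages/PDRandom/PDRandom-1.0.2.zip/PDRandom-1.0.2/PDRandom.py | getGlobalIndex
-- ===== SOURCE A (Python) =====
-- def getGlobalIndex(eachIndex, numDiv):
-- 	globalIndex = 0
-- 	for i in range(len(eachIndex)-1,-1, -1):
-- 		if i == 0:
-- 			globalIndex = globalIndex + eachIndex[i]
-- 		else:
-- 			globalIndex = (globalIndex + eachIndex[i]) * numDiv[i-1]
--
-- 	return globalIndex
-- ===== SOURCE B (Python) =====
-- def getGlobalIndex(eachIndex, numDiv):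
--     total = 0
--     stride = 1
--     for i in range(len(eachIndex)):
--         total += eachIndex[i] * stride
--         if i < len(eachIndex) - 1:
--             stride *= numDiv[i]
--     return total
-- ===== Notes on version B (the rewrite author's own statement) =====
-- stated objective: alternative
-- what changed: Forward low-to-high pass maintaining an explicit running stride (cumulative product of radices) instead of A's backward Horner nesting from the top index down.
import Mathlib
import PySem

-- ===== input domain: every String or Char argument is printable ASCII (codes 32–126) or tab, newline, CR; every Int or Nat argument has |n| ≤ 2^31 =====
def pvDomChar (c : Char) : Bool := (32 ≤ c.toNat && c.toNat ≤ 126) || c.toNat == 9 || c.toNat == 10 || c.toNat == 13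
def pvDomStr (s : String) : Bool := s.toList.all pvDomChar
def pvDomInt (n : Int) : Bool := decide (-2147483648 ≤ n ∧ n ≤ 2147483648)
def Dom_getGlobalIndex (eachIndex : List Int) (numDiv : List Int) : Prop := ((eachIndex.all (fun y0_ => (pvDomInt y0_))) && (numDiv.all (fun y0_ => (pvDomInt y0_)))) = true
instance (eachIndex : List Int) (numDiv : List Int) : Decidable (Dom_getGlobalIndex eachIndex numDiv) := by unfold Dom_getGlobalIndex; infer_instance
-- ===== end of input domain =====

-- B replaces A's backward Horner loop by a forward pass with an explicit running stride; same O(n) cost.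

-- ===== PORT A =====
def getGlobalIndex (eachIndex : List Int) (numDiv : List Int) : Int :=
  (PySem.List.pyRange ((eachIndex.length : Int) - 1) (-1) (-1)).foldl
    (fun globalIndex i =>
      if i == 0 then globalIndex + PySem.List.pyGetD eachIndex i 0
      else (globalIndex + PySem.List.pyGetD eachIndex i 0) * PySem.List.pyGetD numDiv (i - 1) 0)
    0

-- ===== PORT B =====
def getGlobalIndex_alt (eachIndex : List Int) (numDiv : List Int) : Int :=
  ((PySem.List.pyRange 0 (eachIndex.length : Int) 1).foldl
    (fun (s : Int × Int) i =>
      let total := s.1 + PySem.List.pyGetD eachIndex i 0 * s.2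
      let stride := if i < (eachIndex.length : Int) - 1 then s.2 * PySem.List.pyGetD numDiv i 0 else s.2
      (total, stride))
    (0, 1)).1

-- ===== PRECONDITION & SPEC =====
-- Pre_ excludes exactly the inputs where both Pythons raise IndexError: numDiv shorter than len(eachIndex)-1.
def Pre_getGlobalIndex (eachIndex : List Int) (numDiv : List Int) : Prop :=
  eachIndex.length ≤ numDiv.length + 1
instance (eachIndex : List Int) (numDiv : List Int) : Decidable (Pre_getGlobalIndex eachIndex numDiv) := by unfold Pre_getGlobalIndex; infer_instance
def pvWitness_getGlobalIndex : List Int × List Int := ([2, 1, 3], [4, 5])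
def Spec_getGlobalIndex (eachIndex : List Int) (numDiv : List Int) (out : Int) : Prop := out = getGlobalIndex_alt eachIndex numDiv
instance (eachIndex : List Int) (numDiv : List Int) (out : Int) : Decidable (Spec_getGlobalIndex eachIndex numDiv out) := by unfold Spec_getGlobalIndex; infer_instance

-- ===== CLAIM (what is proved, stated in full; the proofs are below) =====
def Claim_equal_getGlobalIndex : Prop := ∀ (eachIndex : List Int) (numDiv : List Int), Dom_getGlobalIndex eachIndex numDiv → Pre_getGlobalIndex eachIndex numDiv → Spec_getGlobalIndex eachIndex numDiv (getGlobalIndex eachIndex numDiv)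

-- ===== LEMMAS AND PROOFS =====

/-- Product of the first `k` radices. -/
def prodTake (ds : List Int) (k : Nat) : Int := (ds.take k).prod

/-- Mixed-radix value of the first `m` digits: Σ_{i<m} e_i · Π_{j<i} d_j. -/
def msum (es ds : List Int) (m : Nat) : Int :=
  ∑ i ∈ Finset.range m, es.getD i 0 * prodTake ds i

theorem msum_succ (es ds : List Int) (m : Nat) :
    msum es ds (m + 1) = msum es ds m + es.getD m 0 * prodTake ds m := by
  simp [msum, Finset.sum_range_succ]

theorem prodTake_succ (ds : List Int) (k : Nat) (hk : k < ds.length) :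
    prodTake ds (k + 1) = prodTake ds k * ds.getD k 0 := by
  unfold prodTake
  rw [List.take_add_one, List.prod_append, List.getElem?_eq_getElem hk]
  simp [List.getD, List.getElem?_eq_getElem hk]

theorem lemA (es ds : List Int) (k : Nat) (hk : k < es.length) (hd : k ≤ ds.length) :
    ∀ g : Int,
      (PySem.List.pyRange (k : Int) (-1) (-1)).foldl
        (fun globalIndex i =>
          if i == 0 then globalIndex + PySem.List.pyGetD es i 0
          else (globalIndex + PySem.List.pyGetD es i 0) * PySem.List.pyGetD ds (i - 1) 0)
        g = g * prodTake ds k + msum es ds (k + 1) := by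
  induction k with
  | zero =>
    intro g
    rw [PySem.List.pyRange_neg_one_cons (by norm_num), PySem.List.pyRange_neg_one_eq_nil (by norm_num)]
    simp [msum, prodTake, PySem.List.pyGetD_zero, List.getD]
  | succ k ih =>
    intro g
    rw [PySem.List.pyRange_neg_one_cons (a := ((k + 1 : Nat) : Int)) (b := -1) (by push_cast; omega)]
    simp only [List.foldl_cons]
    have hne : (((k + 1 : Nat) : Int) == 0) = false := by
      simp only [beq_eq_false_iff_ne, ne_eq]
      omega
    rw [hne]
    simp only [Bool.false_eq_true, if_false]
    have h1 : ((k + 1 : Nat) : Int) - 1 = (k : Int) := by push_cast; ring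
    rw [h1]
    rw [ih (by omega) (by omega)]
    rw [msum_succ es ds (k + 1), prodTake_succ ds k (by omega)]
    simp only [PySem.List.pyGetD_natCast]
    ring

theorem lemB (es ds : List Int) (hpre : es.length ≤ ds.length + 1) (m : Nat) (hm : m ≤ es.length) :
    (PySem.List.pyRange 0 (m : Int) 1).foldl
      (fun (s : Int × Int) i =>
        let total := s.1 + PySem.List.pyGetD es i 0 * s.2
        let stride := if i < (es.length : Int) - 1 then s.2 * PySem.List.pyGetD ds i 0 else s.2
        (total, stride))
      (0, 1) = (msum es ds m, prodTake ds (min m (es.length - 1))) := by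
  induction m with
  | zero =>
    rw [show ((0 : Nat) : Int) = 0 by norm_num, PySem.List.pyRange_one_eq_nil (by norm_num)]
    simp [msum, prodTake]
  | succ m ih =>
    rw [show ((m + 1 : Nat) : Int) = (m : Int) + 1 by push_cast; ring,
      PySem.List.pyRange_one_succ_right (by positivity), List.foldl_append]
    rw [ih (by omega)]
    simp only [List.foldl_cons, List.foldl_nil, PySem.List.pyGetD_natCast]
    have hmin : min m (es.length - 1) = m := by omega
    rw [hmin]
    by_cases hlt : (m : Int) < (es.length : Int) - 1
    · have hm' : m < ds.length := by omega
      rw [if_pos hlt]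
      have hmin2 : min (m + 1) (es.length - 1) = m + 1 := by omega
      rw [hmin2, msum_succ es ds m, prodTake_succ ds m hm']
    · have hme : m = es.length - 1 := by omega
      rw [if_neg hlt]
      have hmin2 : min (m + 1) (es.length - 1) = m := by omega
      rw [hmin2, msum_succ es ds m]


-- ===== VERDICT (by name: the statement is the Claim_ definition above) =====
theorem getGlobalIndex_spec : Claim_equal_getGlobalIndex := by
  intro es ds _ hpre
  unfold Spec_getGlobalIndex getGlobalIndex getGlobalIndex_alt
  rcases Nat.eq_zero_or_pos es.length with h0 | hpos
  · rw [h0]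
    rw [show ((0 : Nat) : Int) - 1 = -1 by norm_num,
      PySem.List.pyRange_neg_one_eq_nil (by norm_num),
      show ((0 : Nat) : Int) = 0 by norm_num,
      PySem.List.pyRange_one_eq_nil (by norm_num)]
    simp
  · have hk : es.length - 1 < es.length := by omega
    have hcast : (es.length : Int) - 1 = ((es.length - 1 : Nat) : Int) := by omega
    rw [lemB es ds hpre es.length (le_refl _)]
    rw [hcast, lemA es ds (es.length - 1) hk (by unfold Pre_getGlobalIndex at hpre; omega)]
    have h2 : es.length - 1 + 1 = es.length := by omega
    rw [h2]
    ring
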